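-- pv_equiv track=rewrite | github.com/sezoom/AnBProtocol | src/benchmark/benchmarkV2.py | build_rename_map
-- ===== SOURCE A (Python) =====
-- def build_rename_map(type_map: dict[str,str]) -> dict[str,str]:
--     """
--     Build canonical abstract names per type:
--       agent -> a1, a2, ...
--       number/nonce -> n1, n2, ...
--       symmetric_key -> k1, k2, ...
--       data -> m1, ...
--       function -> f1, ...
--     """
--     names_by_type: dict[str, list[str]] = {}
--     for name, typ in type_map.items():
--         names_by_type.setdefault(typ, []).append(name)
--
--     prefix_by_type = {
--         "agent": "a",
--         "number": "n",
--         "symmetric_key": "k",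
--         "data": "m",
--         "function": "f"
--     }
--
--     rename_map: dict[str,str] = {}
--     for typ, names in names_by_type.items():
--         base = prefix_by_type.get(typ, "id")
--         # preserve first-occurrence order per type
--         seen = set()
--         ordered = []
--         for n in names:
--             if n not in seen:
--                 seen.add(n)
--                 ordered.append(n)
--         for idx, n in enumerate(ordered, start=1):
--             rename_map[n] = f"{base}{idx}"
--     return rename_map
-- ===== SOURCE B (Python) =====
-- def build_rename_map(type_map: dict[str, str]) -> dict[str, str]:
--     prefix_by_type = {
--         "agent": "a",
--         "number": "n",
--         "symmetric_key": "k",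
--         "data": "m",
--         "function": "f",
--     }
--     return {
--         name: f"{prefix_by_type.get(typ, 'id')}{i}"
--         for typ in dict.fromkeys(type_map.values())
--         for i, name in enumerate((n for n, t in type_map.items() if t == typ), start=1)
--     }
-- ===== Notes on version B (the rewrite author's own statement) =====
-- stated objective: simpler
-- what changed: A groups names into per-type lists via setdefault, then runs a seen/ordered dedup pass and a numbering pass per type; B is a single nested comprehension over the distinct types (dict.fromkeys) that numbers each type's names directly, with no grouping dict and no dedup pass (dict keys are already unique).
import Mathlib
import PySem

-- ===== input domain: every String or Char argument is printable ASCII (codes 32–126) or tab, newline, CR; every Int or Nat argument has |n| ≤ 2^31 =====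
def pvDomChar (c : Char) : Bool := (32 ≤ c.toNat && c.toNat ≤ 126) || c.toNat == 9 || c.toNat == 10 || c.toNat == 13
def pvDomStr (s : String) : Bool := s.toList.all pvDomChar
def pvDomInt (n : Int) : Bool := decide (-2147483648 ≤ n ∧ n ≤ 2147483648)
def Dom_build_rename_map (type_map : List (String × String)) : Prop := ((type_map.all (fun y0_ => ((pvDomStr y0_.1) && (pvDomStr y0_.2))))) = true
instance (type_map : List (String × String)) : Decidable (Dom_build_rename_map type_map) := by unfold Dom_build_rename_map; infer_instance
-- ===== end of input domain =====

-- B replaces A's two-phase grouping (setdefault lists, then a seen/ordered dedup and numbering pass)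
-- by one nested comprehension over the distinct types, numbering each type's names directly (objective: simpler).

-- ===== PORT A =====
def build_rename_map (type_map : List (String × String)) : List (String × String) :=
  -- type_map.items(): the dict's items (unique keys, insertion order)
  let items := (PySem.Dict.ofList type_map).items
  -- for name, typ in type_map.items(): names_by_type.setdefault(typ, []).append(name)
  let names_by_type : PySem.Dict String (List String) :=
    items.foldl (fun d p => d.modify p.2 [] (fun l => l ++ [p.1])) PySem.Dict.empty
  let prefix_by_type : PySem.Dict String String :=
    PySem.Dict.ofList [("agent", "a"), ("number", "n"), ("symmetric_key", "k"), ("data", "m"), ("function", "f")]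
  let rename_map : PySem.Dict String String :=
    names_by_type.items.foldl (fun r q =>
      let base := prefix_by_type.getD q.1 "id"
      -- seen = set(); ordered = []; for n in names: if n not in seen: seen.add(n); ordered.append(n)
      let so := q.2.foldl (fun (st : PySem.Set String × List String) n =>
          if PySem.Set.contains st.1 n then st else (PySem.Set.add st.1 n, st.2 ++ [n]))
          (PySem.Set.empty, [])
      -- for idx, n in enumerate(ordered, start=1): rename_map[n] = f"{base}{idx}"
      (PySem.List.enumerate so.2 1).foldl (fun r p => r.insert p.2 (base ++ PySem.Int.toStr p.1)) r)
      PySem.Dict.empty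
  rename_map.items

-- ===== PORT B =====
def build_rename_map_alt (type_map : List (String × String)) : List (String × String) :=
  let prefix_by_type : PySem.Dict String String :=
    PySem.Dict.ofList [("agent", "a"), ("number", "n"), ("symmetric_key", "k"), ("data", "m"), ("function", "f")]
  let items := (PySem.Dict.ofList type_map).items
  -- {name: f"{prefix_by_type.get(typ,'id')}{i}" for typ in dict.fromkeys(type_map.values())
  --        for i, name in enumerate((n for n, t in type_map.items() if t == typ), start=1)}
  (PySem.List.dedup (items.map (fun p => p.2))).flatMap (fun typ =>
    (PySem.List.enumerate ((items.filter (fun p => p.2 == typ)).map (fun p => p.1)) 1).map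
      (fun q => (q.2, prefix_by_type.getD typ "id" ++ PySem.Int.toStr q.1)))

-- ===== PRECONDITION & SPEC =====
def Spec_build_rename_map (type_map : List (String × String)) (out : List (String × String)) : Prop := out = build_rename_map_alt type_map
instance (type_map : List (String × String)) (out : List (String × String)) : Decidable (Spec_build_rename_map type_map out) := by unfold Spec_build_rename_map; infer_instance

-- ===== CLAIM (what is proved, stated in full; the proofs are below) =====
def Claim_equal_build_rename_map : Prop := ∀ (type_map : List (String × String)), Dom_build_rename_map type_map → Spec_build_rename_map type_map (build_rename_map type_map)

-- ===== LEMMAS AND PROOFS =====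

-- A's seen/ordered pass is the identity on a duplicate-free list (and dict keys are duplicate-free).
theorem pv_dedup_fold_id (names : List String) (s : PySem.Set String) (ord : List String)
    (hfresh : ∀ n ∈ names, n ∉ s) (hnd : names.Nodup) :
    (names.foldl (fun (st : PySem.Set String × List String) n =>
        if PySem.Set.contains st.1 n then st else (PySem.Set.add st.1 n, st.2 ++ [n])) (s, ord)).2
      = ord ++ names := by
  induction names generalizing s ord with
  | nil => simp
  | cons n rest ih =>
    have hn : n ∉ s := hfresh n (by simp)
    have hc : PySem.Set.contains s n = false := by
      simpa using hn
    obtain ⟨hni, hrest⟩ := List.nodup_cons.mp hnd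
    simp only [List.foldl_cons, hc, Bool.false_eq_true, if_false]
    rw [ih (PySem.Set.add s n) (ord ++ [n]) ?_ hrest]
    · simp
    · intro m hm
      rw [PySem.Set.mem_add]
      rintro (h | rfl)
      · exact hfresh m (by simp [hm]) h
      · exact hni hm

-- freshness of a set of keys propagates through an insert loop over fresh keys
theorem pv_contains_foldl_insert {β : Type} (l : List β) (k : β → String) (v : β → String)
    (r : PySem.Dict String String) (n : String)
    (hr : r.contains n = false) (hl : ∀ a ∈ l, k a ≠ n) :
    (l.foldl (fun d a => d.insert (k a) (v a)) r).contains n = false := by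
  induction l generalizing r with
  | nil => simpa
  | cons a rest ih =>
    simp only [List.foldl_cons]
    exact ih _ (by
      rw [PySem.Dict.contains_insert]
      simp only [Bool.or_eq_false_iff]
      exact ⟨by simpa using (hl a (by simp)).symm, hr⟩)
      (fun b hb => hl b (by simp [hb]))

theorem build_rename_map_eq (type_map : List (String × String)) :
    build_rename_map type_map = build_rename_map_alt type_map := by
  unfold build_rename_map build_rename_map_alt
  dsimp only
  set its := (PySem.Dict.ofList type_map).items with hits
  have hkeysnd : (its.map (fun p => p.1)).Nodup := PySem.Dict.nodup_keys_ofList type_map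
  -- characterize names_by_type
  set nbt : PySem.Dict String (List String) :=
    its.foldl (fun d p => d.modify p.2 [] (fun l => l ++ [p.1])) PySem.Dict.empty with hnbt
  set names : String → List String := fun t => (its.filter (fun p => p.2 == t)).map (fun p => p.1) with hnames
  set types : List String := PySem.List.dedup (its.map (fun p => p.2)) with htypes
  have hgetD : ∀ t, nbt.getD t [] = names t := by
    intro t
    have : nbt = (its.map (fun p => (p.2, p.1))).foldl
        (fun d p => d.modify p.1 [] (fun l => l ++ [p.2])) PySem.Dict.empty := by
      rw [hnbt, List.foldl_map]
    rw [this, PySem.Dict.getD_foldl_modify_append]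
    simp [hnames, List.filter_map, List.map_map, Function.comp_def]
  have hkeys : nbt.keys = types := by
    rw [hnbt, PySem.Dict.keys_foldl_modify_key its (fun p => p.2) [] (fun d p l => l ++ [p.1])]
    simp [htypes, PySem.Dict.keys, PySem.Dict.empty, PySem.Set.update_nil_left]
  have hkeysnodup : nbt.keys.Nodup := by
    rw [hkeys, htypes]
    simp [PySem.List.dedup_eq_ofList, PySem.Set.nodup_ofList]
  have hitems : nbt.items = types.map (fun t => (t, names t)) := by
    rw [PySem.Dict.items_eq_map_keys nbt hkeysnodup [], hkeys]
    exact List.map_congr_left (fun t _ => by rw [hgetD])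
  rw [hitems, List.foldl_map]
  -- per-type names are duplicate-free
  have hnamesnd : ∀ t, (names t).Nodup := by
    intro t
    exact List.Nodup.sublist (List.Sublist.map _ List.filter_sublist) hkeysnd
  -- rewrite each outer step: the seen/ordered pass is the identity
  rw [PySem.List.foldl_congr_mem types _
    (fun r t => (PySem.List.enumerate (names t) 1).foldl
      (fun r p => r.insert p.2
        ((PySem.Dict.ofList [("agent", "a"), ("number", "n"), ("symmetric_key", "k"), ("data", "m"), ("function", "f")]).getD t "id"
          ++ PySem.Int.toStr p.1)) r)
    PySem.Dict.empty
    (by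
      intro r t _
      have hso := pv_dedup_fold_id (names t) PySem.Set.empty []
        (by intro n _; simp [PySem.Set.empty]) (hnamesnd t)
      simp only [hso, List.nil_append])]
  -- disjointness of distinct type buckets
  have hdisj : (types.flatMap names).Nodup := by
    rw [List.nodup_flatMap]
    refine ⟨fun t _ => hnamesnd t, ?_⟩
    have htnd : types.Nodup := by
      rw [htypes]; simp [PySem.List.dedup_eq_ofList, PySem.Set.nodup_ofList]
    refine htnd.imp_of_mem ?_
    intro t t' _ _ hne n hn hn'
    simp only [hnames, List.mem_map, List.mem_filter] at hn hn'
    obtain ⟨p, ⟨hp, hpt⟩, hpn⟩ := hn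
    obtain ⟨q, ⟨hq, hqt⟩, hqn⟩ := hn'
    have : p = q := List.inj_on_of_nodup_map hkeysnd hp hq (hpn.trans hqn.symm)
    have h1 : p.2 = t := by simpa using hpt
    have h2 : q.2 = t' := by simpa using hqt
    exact hne (by rw [← h1, this, h2])
  -- main induction over the list of types
  suffices h : ∀ (ts : List String) (r : PySem.Dict String String),
      (ts.flatMap names).Nodup → (∀ n ∈ ts.flatMap names, r.contains n = false) →
      (ts.foldl (fun r t => (PySem.List.enumerate (names t) 1).foldl
        (fun r p => r.insert p.2
          ((PySem.Dict.ofList [("agent", "a"), ("number", "n"), ("symmetric_key", "k"), ("data", "m"), ("function", "f")]).getD t "id"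
            ++ PySem.Int.toStr p.1)) r) r).items
      = r.items ++ ts.flatMap (fun t =>
          (PySem.List.enumerate (names t) 1).map (fun q => (q.2,
            (PySem.Dict.ofList [("agent", "a"), ("number", "n"), ("symmetric_key", "k"), ("data", "m"), ("function", "f")]).getD t "id"
              ++ PySem.Int.toStr q.1))) by
    rw [h types PySem.Dict.empty hdisj (by intro n _; simp [PySem.Dict.contains_empty])]
    rfl
  intro ts
  induction ts with
  | nil => intro r _ _; simp
  | cons t rest ih =>
    intro r hnd hfresh
    simp only [List.flatMap_cons, List.nodup_append] at hnd
    obtain ⟨hndt, hndrest, hdis⟩ := hnd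
    simp only [List.foldl_cons, List.flatMap_cons, ← List.append_assoc]
    rw [ih _ ?_ ?_]
    · rw [PySem.Dict.items_foldl_insert_fresh (PySem.List.enumerate (names t) 1) (fun p => p.2)
        (fun p => (PySem.Dict.ofList [("agent", "a"), ("number", "n"), ("symmetric_key", "k"), ("data", "m"), ("function", "f")]).getD t "id" ++ PySem.Int.toStr p.1) r
        (by
          intro a ha
          exact hfresh a.2 (by
            simp only [List.flatMap_cons, List.mem_append]
            left
            have := PySem.List.map_snd_enumerate (names t) 1
            exact this ▸ List.mem_map_of_mem ha))
        (by rw [PySem.List.map_snd_enumerate]; exact hndt)]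
    · exact hndrest
    · intro n hn
      apply pv_contains_foldl_insert
      · exact hfresh n (by simp [hn])
      · intro a ha
        have ha2 : a.2 ∈ names t := by
          have := PySem.List.map_snd_enumerate (names t) 1
          exact this ▸ List.mem_map_of_mem ha
        intro heq
        rw [heq] at ha2
        exact hdis n ha2 n hn rfl

-- ===== VERDICT (by name: the statement is the Claim_ definition above) =====
theorem build_rename_map_spec : Claim_equal_build_rename_map := by
  intro type_map _
  unfold Spec_build_rename_map
  exact build_rename_map_eq type_map
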